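-- pv_equiv track=rewrite | github.com/PakinWasu/WebAppNMLLM | backend/app/services/parsers/huawei.py | is_valid_interface_name
-- ===== SOURCE A (Python) =====
-- def is_valid_interface_name(iface_str: str) -> bool:
--     """Validate interface name format"""
--     if not iface_str or not isinstance(iface_str, str):
--         return False
--     # Must start with a letter and contain alphanumeric characters
--     if len(iface_str) < 2:
--         return False
--     # Must start with letter (GE, Eth, Vlan, Gigabit, etc.)
--     if not iface_str[0].isalpha():
--         return False
--     # Must contain at least one number
--     if not any(c.isdigit() for c in iface_str):
--         return False
--     # Common interface prefixes
--     valid_prefixes = ['GE', 'Gi', 'Eth', 'Fa', 'Te', 'Se', 'Lo', 'Vl', 'Po', 'Tu', 'MEth', 'GigabitEthernet', 'Ethernet', 'Vlanif', 'LoopBack', 'Eth-Trunk']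
--     iface_upper = iface_str.upper()
--     return any(iface_upper.startswith(prefix.upper()) for prefix in valid_prefixes)
-- ===== SOURCE B (Python) =====
-- def is_valid_interface_name(iface_str: str) -> bool:
--     """Validate interface name format (minimal-prefix table version)."""
--     if not iface_str or not isinstance(iface_str, str):
--         return False
--     if not any(c.isdigit() for c in iface_str):
--         return False
--     # Minimal case-folded prefix set: every prefix A accepts starts with one of these,
--     # and each of these is itself an accepted prefix; matching them makes the
--     # length/leading-letter guards redundant.
--     u = iface_str[:4].upper()
--     return u[:2] in ("GE", "GI", "FA", "TE", "SE", "LO", "VL", "PO", "TU") \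
--         or u[:3] == "ETH" or u == "METH"
-- ===== Notes on version B (the rewrite author's own statement) =====
-- stated objective: simpler
-- what changed: Replaces A's four-guard chain plus case-folding scan over 16 prefixes by a single digit check and a membership test of the first characters against the minimal 11-entry case-folded prefix table (9 two-char keys, 'ETH', 'METH'), the emptiness/length/leading-letter guards being provably redundant.
import Mathlib
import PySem

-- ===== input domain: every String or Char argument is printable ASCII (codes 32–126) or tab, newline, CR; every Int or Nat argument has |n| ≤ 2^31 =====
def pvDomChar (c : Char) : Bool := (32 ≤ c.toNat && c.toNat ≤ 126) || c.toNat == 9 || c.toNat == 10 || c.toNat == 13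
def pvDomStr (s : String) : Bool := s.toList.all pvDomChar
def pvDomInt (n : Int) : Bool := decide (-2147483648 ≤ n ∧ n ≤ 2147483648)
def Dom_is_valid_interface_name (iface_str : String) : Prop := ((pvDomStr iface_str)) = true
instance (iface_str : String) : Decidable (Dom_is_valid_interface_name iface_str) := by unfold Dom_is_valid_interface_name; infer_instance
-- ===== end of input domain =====

-- B replaces A's guard chain and its case-folding scan over 16 prefixes by one digit check
-- and a minimal 11-entry prefix table (simpler; same asymptotic cost).

-- ===== PORT A =====
def pvValidPrefixesA : List (List Char) :=
  [['G','E'], ['G','i'], ['E','t','h'], ['F','a'], ['T','e'], ['S','e'],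
   ['L','o'], ['V','l'], ['P','o'], ['T','u'], ['M','E','t','h'],
   "GigabitEthernet".toList, "Ethernet".toList, "Vlanif".toList, "LoopBack".toList,
   "Eth-Trunk".toList]

def is_valid_interface_name (iface_str : String) : Bool :=
  let l := iface_str.toList
  if l.length = 0 then false            -- `not iface_str` (isinstance is always true here)
  else if l.length < 2 then false
  else
    match l with
    | [] => false                       -- unreachable: guarded by the emptiness check
    | c :: _ =>
      if !(PySem.Chars.isalpha c) then false
      else if !(l.any PySem.Chars.isdigit) then false
      else
        let up := PySem.Chars.upper l
        pvValidPrefixesA.any (fun p => PySem.Chars.startswith up (PySem.Chars.upper p))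

-- ===== PORT B =====
def pvPrefixTableB : List (List Char) :=
  [['G','E'], ['G','I'], ['F','A'], ['T','E'], ['S','E'],
   ['L','O'], ['V','L'], ['P','O'], ['T','U']]

def is_valid_interface_name_alt (iface_str : String) : Bool :=
  let l := iface_str.toList
  if l.length = 0 then false            -- `not iface_str`
  else if !(l.any PySem.Chars.isdigit) then false
  else
    let u := PySem.Chars.upper (PySem.List.slice l none (some 4))
    pvPrefixTableB.contains (PySem.List.slice u none (some 2))
    || (PySem.List.slice u none (some 3) == ['E','T','H'])
    || (u == ['M','E','T','H'])

-- ===== PRECONDITION & SPEC =====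
def Spec_is_valid_interface_name (iface_str : String) (out : Bool) : Prop := out = is_valid_interface_name_alt iface_str
instance (iface_str : String) (out : Bool) : Decidable (Spec_is_valid_interface_name iface_str out) := by unfold Spec_is_valid_interface_name; infer_instance

-- ===== CLAIM (what is proved, stated in full; the proofs are below) =====
def Claim_equal_is_valid_interface_name : Prop := ∀ (iface_str : String), Dom_is_valid_interface_name iface_str → Spec_is_valid_interface_name iface_str (is_valid_interface_name iface_str)

-- ===== LEMMAS AND PROOFS =====

-- a char whose Python uppercase is alphabetic is itself alphabetic
theorem pv_alpha_of_upper_alpha (c : Char)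
    (h : PySem.Chars.isalpha (PySem.Chars.upperChar c) = true) :
    PySem.Chars.isalpha c = true := by
  revert h
  simp [PySem.Chars.upperChar, PySem.Chars.isalpha, PySem.Chars.isupper, PySem.Chars.islower]
  split_ifs <;> simp_all

-- `take`-equality against a literal is a prefix statement
theorem pv_take_eq_iff_prefix (u lit : List Char) (k : Nat) (hk : lit.length = k) :
    (u.take k = lit) ↔ lit <+: u := by
  rw [List.prefix_iff_eq_take, hk, eq_comm]

-- A's 16 case-folded prefixes match exactly when B's 11 minimal ones do (absorption)
theorem pv_absorb (u : List Char) : (['G', 'E'] <+: u ∨ ['G', 'I'] <+: u ∨ ['E', 'T', 'H'] <+: u ∨ ['F', 'A'] <+: u ∨ ['T', 'E'] <+: u ∨ ['S', 'E'] <+: u ∨ ['L', 'O'] <+: u ∨ ['V', 'L'] <+: u ∨ ['P', 'O'] <+: u ∨ ['T', 'U'] <+: u ∨ ['M', 'E', 'T', 'H'] <+: u ∨ ['G', 'I', 'G', 'A', 'B', 'I', 'T', 'E', 'T', 'H', 'E', 'R', 'N', 'E', 'T'] <+: u ∨ ['E', 'T', 'H', 'E', 'R', 'N', 'E', 'T']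 <+: u ∨ ['V', 'L', 'A', 'N', 'I', 'F'] <+: u ∨ ['L', 'O', 'O', 'P', 'B', 'A', 'C', 'K'] <+: u ∨ ['E', 'T', 'H', '-', 'T', 'R', 'U', 'N', 'K'] <+: u) ↔ (['G', 'E'] <+: u ∨ ['G', 'I'] <+: u ∨ ['F', 'A'] <+: u ∨ ['T', 'E'] <+: u ∨ ['S', 'E'] <+: u ∨ ['L', 'O'] <+: u ∨ ['V', 'L'] <+: u ∨ ['P', 'O'] <+: u ∨ ['T', 'U'] <+: u ∨ ['E', 'T', 'H'] <+: u ∨ ['M', 'E', 'T', 'H'] <+: u) := by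
  constructor
  · rintro (h|h|h|h|h|h|h|h|h|h|h|h|h|h|h|h)
    · exact Or.inl h
    · exact Or.inr (Or.inl h)
    · exact Or.inr (Or.inr (Or.inr (Or.inr (Or.inr (Or.inr (Or.inr (Or.inr (Or.inr (Or.inl h)))))))))
    · exact Or.inr (Or.inr (Or.inl h))
    · exact Or.inr (Or.inr (Or.inr (Or.inl h)))
    · exact Or.inr (Or.inr (Or.inr (Or.inr (Or.inl h))))
    · exact Or.inr (Or.inr (Or.inr (Or.inr (Or.inr (Or.inl h)))))
    · exact Or.inr (Or.inr (Or.inr (Or.inr (Or.inr (Or.inr (Or.inl h))))))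
    · exact Or.inr (Or.inr (Or.inr (Or.inr (Or.inr (Or.inr (Or.inr (Or.inl h)))))))
    · exact Or.inr (Or.inr (Or.inr (Or.inr (Or.inr (Or.inr (Or.inr (Or.inr (Or.inl h))))))))
    · exact Or.inr (Or.inr (Or.inr (Or.inr (Or.inr (Or.inr (Or.inr (Or.inr (Or.inr (Or.inr (h))))))))))
    · exact Or.inr (Or.inl (List.IsPrefix.trans (show ['G', 'I'] <+: ['G', 'I', 'G', 'A', 'B', 'I', 'T', 'E', 'T', 'H', 'E', 'R', 'N', 'E', 'T'] by decide) h))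
    · exact Or.inr (Or.inr (Or.inr (Or.inr (Or.inr (Or.inr (Or.inr (Or.inr (Or.inr (Or.inl (List.IsPrefix.trans (show ['E', 'T', 'H'] <+: ['E', 'T', 'H', 'E', 'R', 'N', 'E', 'T'] by decide) h))))))))))
    · exact Or.inr (Or.inr (Or.inr (Or.inr (Or.inr (Or.inr (Or.inl (List.IsPrefix.trans (show ['V', 'L'] <+: ['V', 'L', 'A', 'N', 'I', 'F'] by decide) h)))))))
    · exact Or.inr (Or.inr (Or.inr (Or.inr (Or.inr (Or.inl (List.IsPrefix.trans (show ['L', 'O'] <+: ['L', 'O', 'O', 'P', 'B', 'A', 'C', 'K'] by decide) h))))))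
    · exact Or.inr (Or.inr (Or.inr (Or.inr (Or.inr (Or.inr (Or.inr (Or.inr (Or.inr (Or.inl (List.IsPrefix.trans (show ['E', 'T', 'H'] <+: ['E', 'T', 'H', '-', 'T', 'R', 'U', 'N', 'K'] by decide) h))))))))))
  · rintro (h|h|h|h|h|h|h|h|h|h|h)
    · exact Or.inl h
    · exact Or.inr (Or.inl h)
    · exact Or.inr (Or.inr (Or.inr (Or.inl h)))
    · exact Or.inr (Or.inr (Or.inr (Or.inr (Or.inl h))))
    · exact Or.inr (Or.inr (Or.inr (Or.inr (Or.inr (Or.inl h)))))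
    · exact Or.inr (Or.inr (Or.inr (Or.inr (Or.inr (Or.inr (Or.inl h))))))
    · exact Or.inr (Or.inr (Or.inr (Or.inr (Or.inr (Or.inr (Or.inr (Or.inl h)))))))
    · exact Or.inr (Or.inr (Or.inr (Or.inr (Or.inr (Or.inr (Or.inr (Or.inr (Or.inl h))))))))
    · exact Or.inr (Or.inr (Or.inr (Or.inr (Or.inr (Or.inr (Or.inr (Or.inr (Or.inr (Or.inl h)))))))))
    · exact Or.inr (Or.inr (Or.inl h))
    · exact Or.inr (Or.inr (Or.inr (Or.inr (Or.inr (Or.inr (Or.inr (Or.inr (Or.inr (Or.inr (Or.inl h))))))))))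

theorem is_valid_interface_name_spec : Claim_equal_is_valid_interface_name := by
  intro s _
  unfold Spec_is_valid_interface_name
  simp only [is_valid_interface_name, is_valid_interface_name_alt]
  generalize s.toList = l
  cases l with
  | nil => simp
  | cons c0 t =>
    by_cases hdig : (c0 :: t).any PySem.Chars.isdigit
    case neg => simp [hdig]
    case pos =>
    have hu4 : PySem.Chars.upper (PySem.List.slice (c0 :: t) none (some 4))
        = (PySem.Chars.upper (c0 :: t)).take 4 := by
      rw [PySem.List.slice_to _ (by norm_num)]
      simp [PySem.Chars.upper, List.map_take]
    have hsl2 : PySem.List.slice ((PySem.Chars.upper (c0 :: t)).take 4) none (some 2)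
        = (PySem.Chars.upper (c0 :: t)).take 2 := by
      rw [PySem.List.slice_to _ (by norm_num)]
      simp [List.take_take]
    have hsl3 : PySem.List.slice ((PySem.Chars.upper (c0 :: t)).take 4) none (some 3)
        = (PySem.Chars.upper (c0 :: t)).take 3 := by
      rw [PySem.List.slice_to _ (by norm_num)]
      simp [List.take_take]
    simp only [hdig, hu4, hsl2, hsl3]
    have eA0 : PySem.Chars.upper ['G', 'E'] = ['G', 'E'] := by decide
    have eA1 : PySem.Chars.upper ['G', 'i'] = ['G', 'I'] := by decide
    have eA2 : PySem.Chars.upper ['E', 't', 'h'] = ['E', 'T', 'H'] := by decide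
    have eA3 : PySem.Chars.upper ['F', 'a'] = ['F', 'A'] := by decide
    have eA4 : PySem.Chars.upper ['T', 'e'] = ['T', 'E'] := by decide
    have eA5 : PySem.Chars.upper ['S', 'e'] = ['S', 'E'] := by decide
    have eA6 : PySem.Chars.upper ['L', 'o'] = ['L', 'O'] := by decide
    have eA7 : PySem.Chars.upper ['V', 'l'] = ['V', 'L'] := by decide
    have eA8 : PySem.Chars.upper ['P', 'o'] = ['P', 'O'] := by decide
    have eA9 : PySem.Chars.upper ['T', 'u'] = ['T', 'U'] := by decide
    have eA10 : PySem.Chars.upper ['M', 'E', 't', 'h'] = ['M', 'E', 'T', 'H'] := by decide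
    have eA11 : PySem.Chars.upper ['G', 'i', 'g', 'a', 'b', 'i', 't', 'E', 't', 'h', 'e', 'r', 'n', 'e', 't'] = ['G', 'I', 'G', 'A', 'B', 'I', 'T', 'E', 'T', 'H', 'E', 'R', 'N', 'E', 'T'] := by decide
    have eA12 : PySem.Chars.upper ['E', 't', 'h', 'e', 'r', 'n', 'e', 't'] = ['E', 'T', 'H', 'E', 'R', 'N', 'E', 'T'] := by decide
    have eA13 : PySem.Chars.upper ['V', 'l', 'a', 'n', 'i', 'f'] = ['V', 'L', 'A', 'N', 'I', 'F'] := by decide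
    have eA14 : PySem.Chars.upper ['L', 'o', 'o', 'p', 'B', 'a', 'c', 'k'] = ['L', 'O', 'O', 'P', 'B', 'A', 'C', 'K'] := by decide
    have eA15 : PySem.Chars.upper ['E', 't', 'h', '-', 'T', 'r', 'u', 'n', 'k'] = ['E', 'T', 'H', '-', 'T', 'R', 'U', 'N', 'K'] := by decide
    have hPA : (pvValidPrefixesA.any (fun p => PySem.Chars.startswith (PySem.Chars.upper (c0 :: t)) (PySem.Chars.upper p))) = true ↔ (['G', 'E'] <+: PySem.Chars.upper (c0 :: t) ∨ ['G', 'I'] <+: PySem.Chars.upper (c0 :: t) ∨ ['F', 'A'] <+: PySem.Chars.upper (c0 :: t) ∨ ['T', 'E'] <+: PySem.Chars.upper (c0 :: t) ∨ ['S', 'E'] <+: PySem.Chars.upper (c0 :: t) ∨ ['L', 'O'] <+: PySem.Chars.upper (c0 :: t) ∨ ['V', 'L'] <+: PySem.Chars.upper (c0 :: t) ∨ ['P', 'O'] <+: PySem.Chars.upper (c0 :: t) ∨ ['T', 'U'] <+: PySem.Chars.upper (c0 :: t) ∨ ['E', 'T', 'H'] <+: PySem.Chars.upper (c0 :: t) ∨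 ['M', 'E', 'T', 'H'] <+: PySem.Chars.upper (c0 :: t)) := by
      rw [show (pvValidPrefixesA.any (fun p => PySem.Chars.startswith (PySem.Chars.upper (c0 :: t)) (PySem.Chars.upper p))) = true ↔ (['G', 'E'] <+: PySem.Chars.upper (c0 :: t) ∨ ['G', 'I'] <+: PySem.Chars.upper (c0 :: t) ∨ ['E', 'T', 'H'] <+: PySem.Chars.upper (c0 :: t) ∨ ['F', 'A'] <+: PySem.Chars.upper (c0 :: t) ∨ ['T', 'E'] <+: PySem.Chars.upper (c0 :: t) ∨ ['S', 'E'] <+: PySem.Chars.upper (c0 :: t) ∨ ['L', 'O'] <+: PySem.Chars.upper (c0 :: t) ∨ ['V', 'L'] <+: PySem.Chars.upper (c0 :: t) ∨ ['P', 'O'] <+: PySem.Chars.upper (c0 :: t) ∨ ['T', 'U'] <+: PySem.Chars.upper (c0 :: t) ∨ ['M', 'E', 'T', 'H'] <+: PySem.Chars.upper (c0 :: t) ∨ ['G', 'I', 'G', 'A', 'B', 'I', 'T', 'E', 'T', 'H', 'E', 'R', 'N', 'E', 'T'] <+: PySem.Chars.upper (c0 :: t) ∨ ['E', 'T', 'H',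 'E', 'R', 'N', 'E', 'T'] <+: PySem.Chars.upper (c0 :: t) ∨ ['V', 'L', 'A', 'N', 'I', 'F'] <+: PySem.Chars.upper (c0 :: t) ∨ ['L', 'O', 'O', 'P', 'B', 'A', 'C', 'K'] <+: PySem.Chars.upper (c0 :: t) ∨ ['E', 'T', 'H', '-', 'T', 'R', 'U', 'N', 'K'] <+: PySem.Chars.upper (c0 :: t)) from by
        simp [pvValidPrefixesA, eA0, eA1, eA2, eA3, eA4, eA5, eA6, eA7, eA8, eA9, eA10, eA11, eA12, eA13, eA14, eA15, PySem.Chars.startswith, List.isPrefixOf_iff_prefix]]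
      exact pv_absorb (PySem.Chars.upper (c0 :: t))
    have hPB : ((pvPrefixTableB.contains ((PySem.Chars.upper (c0 :: t)).take 2) || ((PySem.Chars.upper (c0 :: t)).take 3 == ['E','T','H']) || ((PySem.Chars.upper (c0 :: t)).take 4 == ['M','E','T','H']))) = true ↔ (['G', 'E'] <+: PySem.Chars.upper (c0 :: t) ∨ ['G', 'I'] <+: PySem.Chars.upper (c0 :: t) ∨ ['F', 'A'] <+: PySem.Chars.upper (c0 :: t) ∨ ['T', 'E'] <+: PySem.Chars.upper (c0 :: t) ∨ ['S', 'E'] <+: PySem.Chars.upper (c0 :: t) ∨ ['L', 'O'] <+: PySem.Chars.upper (c0 :: t) ∨ ['V', 'L'] <+: PySem.Chars.upper (c0 :: t) ∨ ['P', 'O'] <+: PySem.Chars.upper (c0 :: t) ∨ ['T', 'U'] <+: PySem.Chars.upper (c0 :: t) ∨ ['E', 'T', 'H'] <+: PySem.Chars.upper (c0 :: t) ∨ ['M', 'E', 'T', 'H'] <+: PySem.Chars.upper (c0 :: t)) := by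
      simp [pvPrefixTableB, pv_take_eq_iff_prefix (PySem.Chars.upper (c0 :: t)) ['G', 'E'] 2 (by decide), pv_take_eq_iff_prefix (PySem.Chars.upper (c0 :: t)) ['G', 'I'] 2 (by decide), pv_take_eq_iff_prefix (PySem.Chars.upper (c0 :: t)) ['F', 'A'] 2 (by decide), pv_take_eq_iff_prefix (PySem.Chars.upper (c0 :: t)) ['T', 'E'] 2 (by decide), pv_take_eq_iff_prefix (PySem.Chars.upper (c0 :: t)) ['S', 'E'] 2 (by decide), pv_take_eq_iff_prefix (PySem.Chars.upper (c0 :: t)) ['L', 'O'] 2 (by decide), pv_take_eq_iff_prefix (PySem.Chars.upper (c0 :: t)) ['V', 'L'] 2 (by decide), pv_take_eq_iff_prefix (PySem.Chars.upper (c0 :: t)) ['P', 'O'] 2 (by decide), pv_take_eq_iff_prefix (PySem.Chars.upper (c0 :: t)) ['T', 'U'] 2 (by decide), pv_take_eq_iff_prefix (PySem.Chars.upper (c0 :: t)) ['E', 'T', 'H'] 3 (by decide), pv_take_eq_iff_prefix (PySem.Chars.upper (c0 :: t)) ['M', 'E', 'T', 'H'] 4 (by decide), or_assoc]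
    have hlen : (['G', 'E'] <+: PySem.Chars.upper (c0 :: t) ∨ ['G', 'I'] <+: PySem.Chars.upper (c0 :: t) ∨ ['F', 'A'] <+: PySem.Chars.upper (c0 :: t) ∨ ['T', 'E'] <+: PySem.Chars.upper (c0 :: t) ∨ ['S', 'E'] <+: PySem.Chars.upper (c0 :: t) ∨ ['L', 'O'] <+: PySem.Chars.upper (c0 :: t) ∨ ['V', 'L'] <+: PySem.Chars.upper (c0 :: t) ∨ ['P', 'O'] <+: PySem.Chars.upper (c0 :: t) ∨ ['T', 'U'] <+: PySem.Chars.upper (c0 :: t) ∨ ['E', 'T', 'H'] <+: PySem.Chars.upper (c0 :: t) ∨ ['M', 'E', 'T', 'H'] <+: PySem.Chars.upper (c0 :: t)) → ¬((c0 :: t).length < 2) := by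
      rintro (h|h|h|h|h|h|h|h|h|h|h) <;>
        · have hle := List.IsPrefix.length_le h
          simp only [PySem.Chars.upper, List.length_map, List.length_cons] at hle ⊢
          omega
    have halpha : (['G', 'E'] <+: PySem.Chars.upper (c0 :: t) ∨ ['G', 'I'] <+: PySem.Chars.upper (c0 :: t) ∨ ['F', 'A'] <+: PySem.Chars.upper (c0 :: t) ∨ ['T', 'E'] <+: PySem.Chars.upper (c0 :: t) ∨ ['S', 'E'] <+: PySem.Chars.upper (c0 :: t) ∨ ['L', 'O'] <+: PySem.Chars.upper (c0 :: t) ∨ ['V', 'L'] <+: PySem.Chars.upper (c0 :: t) ∨ ['P', 'O'] <+: PySem.Chars.upper (c0 :: t) ∨ ['T', 'U'] <+: PySem.Chars.upper (c0 :: t) ∨ ['E', 'T', 'H'] <+: PySem.Chars.upper (c0 :: t) ∨ ['M', 'E', 'T', 'H'] <+: PySem.Chars.upper (c0 :: t)) → PySem.Chars.isalpha c0 = true := by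
      rintro (h|h|h|h|h|h|h|h|h|h|h) <;>
        · simp only [PySem.Chars.upper, List.map] at h
          exact pv_alpha_of_upper_alpha c0 (by rw [← (List.cons_prefix_cons.mp h).1]; decide)
    by_cases hB : (['G', 'E'] <+: PySem.Chars.upper (c0 :: t) ∨ ['G', 'I'] <+: PySem.Chars.upper (c0 :: t) ∨ ['F', 'A'] <+: PySem.Chars.upper (c0 :: t) ∨ ['T', 'E'] <+: PySem.Chars.upper (c0 :: t) ∨ ['S', 'E'] <+: PySem.Chars.upper (c0 :: t) ∨ ['L', 'O'] <+: PySem.Chars.upper (c0 :: t) ∨ ['V', 'L'] <+: PySem.Chars.upper (c0 :: t) ∨ ['P', 'O'] <+: PySem.Chars.upper (c0 :: t) ∨ ['T', 'U'] <+: PySem.Chars.upper (c0 :: t) ∨ ['E', 'T', 'H'] <+: PySem.Chars.upper (c0 :: t) ∨ ['M', 'E', 'T', 'H'] <+: PySem.Chars.upper (c0 :: t))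
    · simp only [halpha hB, hPA.mpr hB, hPB.mpr hB]
      have ht : t ≠ [] := by intro hh; subst hh; exact hlen hB (by simp)
      simp [ht]
    · have hPAf := Bool.eq_false_iff.mpr (fun hh => hB (hPA.mp hh))
      have hPBf := Bool.eq_false_iff.mpr (fun hh => hB (hPB.mp hh))
      split_ifs <;> simp only [hPAf, hPBf]
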